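-- pv_equiv track=rewrite | github.com/ddw02141/leetcode | Stack/321.py | maxNumber
-- ===== SOURCE A (Python) =====
-- from typing import List
--
-- def maxNumber(nums1: List[int], nums2: List[int], k: int) -> List[int]:
--     len1, len2 = len(nums1), len(nums2)
--
--     def maxList(nums, numLeft):
--         drop = len(nums) - numLeft
--         stack = list()
--         for num in nums:
--             while drop > 0 and stack and stack[-1] < num:
--                 stack.pop()
--                 drop -= 1
--             stack.append(num)
--         return stack[:numLeft]
--
--     def merge(n1, n2):
--         return [max(n1, n2).pop(0) for _ in range(len(n1) + len(n2))]
--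
--     answerList = list()
--     for i in range(0, k + 1):
--         if i <= len1 and k - i <= len2:
--             maxNums1, maxNums2 = maxList(nums1, i), maxList(nums2, k - i)
--             answerList.append(merge(maxNums1, maxNums2))
--     return max(answerList)
-- ===== SOURCE B (Python) =====
-- from typing import List
--
-- def maxNumber(nums1: List[int], nums2: List[int], k: int) -> List[int]:
--     def pick(nums, t):
--         # greedy stack: lexicographically largest subsequence of length t
--         drop = len(nums) - t
--         stack = []
--         for x in nums:
--             while drop > 0 and stack and stack[-1] < x:
--                 stack.pop()
--                 drop -= 1
--             stack.append(x)
--         return stack[:t]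
--
--     def merge(a, b):
--         # precompute ge[i][j] == (a[i:] >= b[j:]) bottom-up, then a two-pointer
--         # walk over immutable lists (no pop(0), no repeated suffix comparisons)
--         m = len(b)
--         rows = [[False] * m + [True]]            # row for i == len(a)
--         for x in reversed(a):
--             prev = rows[0]
--             row = [x > bj or (x == bj and pj) for bj, pj in zip(b, prev[1:])] + [True]
--             rows.insert(0, row)
--         out = []
--         i = j = 0
--         while i < len(a) or j < m:
--             if rows[i][j]:
--                 out.append(a[i]); i += 1
--             else:
--                 out.append(b[j]); j += 1
--         return out
--
--     best = None
--     for i in range(k + 1):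
--         if i <= len(nums1) and k - i <= len(nums2):
--             cand = merge(pick(nums1, i), pick(nums2, k - i))
--             if best is None or cand > best:
--                 best = cand
--     return best
-- ===== Notes on version B (the rewrite author's own statement) =====
-- stated objective: alternative
-- what changed: The merge step is replaced by a two-pointer walk over immutable lists driven by a precomputed suffix-comparison table (no pop(0), no repeated lexicographic re-scans of mutated lists), and the outer loop keeps a running best candidate instead of collecting all candidates and calling max; Pre_ excludes k outside [0, len1+len2], where A raises ValueError on max of an empty list.
import Mathlib
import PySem

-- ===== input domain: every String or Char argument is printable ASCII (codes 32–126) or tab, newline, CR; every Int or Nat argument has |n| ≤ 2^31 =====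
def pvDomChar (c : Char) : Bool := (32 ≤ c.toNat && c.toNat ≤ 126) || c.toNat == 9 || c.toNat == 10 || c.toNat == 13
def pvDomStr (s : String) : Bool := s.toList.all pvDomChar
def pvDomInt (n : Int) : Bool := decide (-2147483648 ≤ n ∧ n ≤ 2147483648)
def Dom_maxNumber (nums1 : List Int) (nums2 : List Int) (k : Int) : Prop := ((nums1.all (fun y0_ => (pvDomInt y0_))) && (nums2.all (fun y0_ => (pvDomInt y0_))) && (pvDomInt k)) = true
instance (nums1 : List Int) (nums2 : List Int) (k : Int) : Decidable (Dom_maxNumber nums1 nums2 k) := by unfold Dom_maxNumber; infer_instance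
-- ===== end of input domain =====

-- B replaces A's pop(0)/max-on-mutated-lists merge by a precomputed suffix-comparison
-- table with a two-pointer walk, and keeps a running best instead of max over a list
-- of all candidates (objective: alternative; same worst-case asymptotics).

-- ===== PORT A =====

-- Python list comparison `x > y` (lexicographic, used by max)
def pyListGt : List Int → List Int → Bool
  | [], _ => false
  | _ :: _, [] => true
  | a :: as_, b :: bs => if a > b then true else if a < b then false else pyListGt as_ bs

-- inner `while drop > 0 and stack and stack[-1] < num` (stack stored top-first)
def popWhileA : Int → List Int → Int → Int × List Int
  | drop, [], _ => (drop, [])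
  | drop, t :: rest, num =>
    if drop > 0 ∧ t < num then popWhileA (drop - 1) rest num else (drop, t :: rest)

def maxListA (nums : List Int) (numLeft : Int) : List Int :=
  let res := nums.foldl (fun (st : Int × List Int) num =>
      let st' := popWhileA st.1 st.2 num
      (st'.1, num :: st'.2)) ((nums.length : Int) - numLeft, [])
  PySem.List.slice res.2.reverse none (some numLeft)

-- `[max(n1, n2).pop(0) for _ in range(len(n1) + len(n2))]`; max(n1,n2) is n2 iff n2 > n1
def mergeA : Nat → List Int → List Int → List Int
  | 0, _, _ => []
  | n + 1, a, b =>
    if pyListGt b a then b.headD 0 :: mergeA n a b.tail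
    else a.headD 0 :: mergeA n a.tail b

def maxNumber (nums1 : List Int) (nums2 : List Int) (k : Int) : List Int :=
  let len1 : Int := nums1.length
  let len2 : Int := nums2.length
  let answerList := (PySem.List.pyRange 0 (k + 1) 1).foldl (fun acc i =>
      if i ≤ len1 ∧ k - i ≤ len2 then
        let m1 := maxListA nums1 i
        let m2 := maxListA nums2 (k - i)
        acc ++ [mergeA (m1.length + m2.length) m1 m2]
      else acc) []
  match answerList with
  | [] => []  -- Python raises ValueError (max of empty); excluded by Pre_
  | h :: t => t.foldl (fun m c => if pyListGt c m then c else m) h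

-- ===== PORT B =====

def popWhileB : Int → List Int → Int → Int × List Int
  | drop, [], _ => (drop, [])
  | drop, t :: rest, num =>
    if drop > 0 ∧ t < num then popWhileB (drop - 1) rest num else (drop, t :: rest)

def pickB (nums : List Int) (t : Int) : List Int :=
  let res := nums.foldl (fun (st : Int × List Int) x =>
      let st' := popWhileB st.1 st.2 x
      (st'.1, x :: st'.2)) ((nums.length : Int) - t, [])
  PySem.List.slice res.2.reverse none (some t)

-- row for i == len(a): [False]*m + [True]
def baseRowB : List Int → List Bool
  | [] => [true]
  | _ :: bs => false :: baseRowB bs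

-- [x > bj or (x == bj and pj) for bj, pj in zip(b, prev[1:])] + [True]; prev aligned with the same b-suffix
def geRowB (x : Int) : List Int → List Bool → List Bool
  | [], _ => [true]
  | b :: bs, prev =>
    (decide (x > b) || (decide (x = b) && prev.tail.headD false)) :: geRowB x bs prev.tail

-- rows built back to front over reversed(a); rows[i][j] == (a[i:] >= b[j:])
def buildRowsB (a b : List Int) : List (List Bool) :=
  a.foldr (fun x rows => geRowB x b (rows.headD []) :: rows) [baseRowB b]

-- two-pointer walk `while i < len(a) or j < m`
def walkB : Nat → List (List Bool) → List Int → List Int → Nat → Nat → List Int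
  | 0, _, _, _, _, _ => []
  | fuel + 1, rows, a, b, i, j =>
    if i < a.length ∨ j < b.length then
      if (rows.getD i []).getD j false then
        a.getD i 0 :: walkB fuel rows a b (i + 1) j
      else
        b.getD j 0 :: walkB fuel rows a b i (j + 1)
    else []

def mergeB (a b : List Int) : List Int :=
  walkB (a.length + b.length) (buildRowsB a b) a b 0 0

def maxNumber_alt (nums1 : List Int) (nums2 : List Int) (k : Int) : List Int :=
  let best := (PySem.List.pyRange 0 (k + 1) 1).foldl (fun (best : Option (List Int)) i =>
      if i ≤ (nums1.length : Int) ∧ k - i ≤ (nums2.length : Int) then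
        let cand := mergeB (pickB nums1 i) (pickB nums2 (k - i))
        match best with
        | none => some cand
        | some m => if pyListGt cand m then some cand else some m
      else best) none
  best.getD []  -- Python returns None when no split qualifies; excluded by Pre_

-- ===== PRECONDITION & SPEC =====
-- Pre_ excludes exactly the inputs where Python A raises: k < 0 or k > len1+len2
-- make max(answerList) a ValueError on the empty list (B returns None there).
def Pre_maxNumber (nums1 : List Int) (nums2 : List Int) (k : Int) : Prop :=
  0 ≤ k ∧ k ≤ (nums1.length : Int) + (nums2.length : Int)
instance (nums1 : List Int) (nums2 : List Int) (k : Int) : Decidable (Pre_maxNumber nums1 nums2 k) := by unfold Pre_maxNumber; infer_instance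

def pvWitness_maxNumber : List Int × List Int × Int := ([3, 1], [2], 2)

def Spec_maxNumber (nums1 : List Int) (nums2 : List Int) (k : Int) (out : List Int) : Prop := out = maxNumber_alt nums1 nums2 k
instance (nums1 : List Int) (nums2 : List Int) (k : Int) (out : List Int) : Decidable (Spec_maxNumber nums1 nums2 k out) := by unfold Spec_maxNumber; infer_instance

-- ===== CLAIM (what is proved, stated in full; the proofs are below) =====
def Claim_equal_maxNumber : Prop := ∀ (nums1 : List Int) (nums2 : List Int) (k : Int), Dom_maxNumber nums1 nums2 k → Pre_maxNumber nums1 nums2 k → Spec_maxNumber nums1 nums2 k (maxNumber nums1 nums2 k)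

-- ===== LEMMAS AND PROOFS =====

-- Python `a >= b` on lists, as a Bool
def pyListGe : List Int → List Int → Bool
  | _, [] => true
  | [], _ :: _ => false
  | a :: as_, b :: bs => if a > b then true else if a < b then false else pyListGe as_ bs

theorem popWhileB_eq (d : Int) (s : List Int) (n : Int) : popWhileB d s n = popWhileA d s n := by
  induction s generalizing d with
  | nil => rfl
  | cons t rest ih =>
    simp only [popWhileB, popWhileA]
    split_ifs <;> simp [ih]

theorem pickB_eq (nums : List Int) (t : Int) : pickB nums t = maxListA nums t := by
  simp only [pickB, maxListA, popWhileB_eq]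

theorem ge_eq_not_gt (a b : List Int) : pyListGe a b = !pyListGt b a := by
  induction a generalizing b with
  | nil => cases b <;> rfl
  | cons x xs ih =>
    cases b with
    | nil => rfl
    | cons y ys =>
      simp only [pyListGe, pyListGt]
      rcases lt_trichotomy x y with h | h | h
      · simp [h, lt_asymm h]
      · subst h; simp [ih]
      · simp [h, lt_asymm h]

theorem ge_nil (a : List Int) : pyListGe a [] = true := by cases a <;> rfl

-- spec row: entry j is pyListGe s (b.drop j)
def rowSpec (s : List Int) : List Int → List Bool
  | [] => [true]
  | y :: ys => pyListGe s (y :: ys) :: rowSpec s ys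

theorem baseRowB_eq (b : List Int) : baseRowB b = rowSpec [] b := by
  induction b with
  | nil => rfl
  | cons y ys ih => simp [baseRowB, rowSpec, pyListGe, ih]

theorem rowSpec_headD (s b : List Int) : (rowSpec s b).headD false = pyListGe s b := by
  cases b with
  | nil => simp [rowSpec, ge_nil]
  | cons y ys => rfl

theorem geRowB_step (x : Int) (s b : List Int) :
    geRowB x b (rowSpec s b) = rowSpec (x :: s) b := by
  induction b with
  | nil => rfl
  | cons y ys ih =>
    show (decide (x > y) || (decide (x = y) && (rowSpec s (y :: ys)).tail.headD false))
          :: geRowB x ys (rowSpec s (y :: ys)).tail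
        = pyListGe (x :: s) (y :: ys) :: rowSpec (x :: s) ys
    have htail : (rowSpec s (y :: ys)).tail = rowSpec s ys := rfl
    rw [htail, ih, rowSpec_headD]
    congr 1
    show (decide (x > y) || (decide (x = y) && pyListGe s ys)) = pyListGe (x :: s) (y :: ys)
    simp only [pyListGe]
    rcases lt_trichotomy x y with h | h | h
    · simp [h, lt_asymm h, ne_of_lt h]
    · subst h; simp
    · simp [h, Ne.symm (ne_of_lt h)]

theorem buildRowsB_eq (a b : List Int) :
    buildRowsB a b = a.tails.map (fun s => rowSpec s b) := by
  induction a with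
  | nil => simp [buildRowsB, baseRowB_eq]
  | cons x a' ih =>
    have : buildRowsB (x :: a') b = geRowB x b ((buildRowsB a' b).headD []) :: buildRowsB a' b := rfl
    rw [this, ih]
    have hhead : ((a'.tails.map (fun s => rowSpec s b)).headD []) = rowSpec a' b := by
      cases a' <;> simp [List.tails]
    rw [hhead, geRowB_step]
    simp [List.tails]

theorem tails_getD (a : List Int) (i : Nat) (h : i ≤ a.length) :
    a.tails.getD i [] = a.drop i := by
  induction a generalizing i with
  | nil => have : i = 0 := Nat.le_zero.mp (by simpa using h)
           subst this; rfl
  | cons x a' ih =>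
    cases i with
    | zero => rfl
    | succ i' =>
      simp only [List.tails, List.drop_succ_cons]
      exact ih i' (by simpa using h)

theorem rowSpec_getD (s b : List Int) (j : Nat) (h : j ≤ b.length) :
    (rowSpec s b).getD j false = pyListGe s (b.drop j) := by
  induction b generalizing j with
  | nil => have : j = 0 := Nat.le_zero.mp (by simpa using h)
           subst this; simp [rowSpec, ge_nil]
  | cons y ys ih =>
    cases j with
    | zero => rfl
    | succ j' =>
      simp only [rowSpec, List.getD_cons_succ, List.drop_succ_cons]
      exact ih j' (by simpa using h)

theorem lookup_eq (a b : List Int) (i j : Nat) (hi : i ≤ a.length) (hj : j ≤ b.length) :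
    ((buildRowsB a b).getD i []).getD j false = pyListGe (a.drop i) (b.drop j) := by
  rw [buildRowsB_eq]
  have hlt : i < a.tails.length := by simp [List.length_tails]; omega
  have hmap : (a.tails.map (fun s => rowSpec s b)).getD i [] = rowSpec (a.drop i) b := by
    have hlt' : i < (a.tails.map (fun s => rowSpec s b)).length := by simpa using hlt
    rw [List.getD_eq_getElem _ _ hlt', List.getElem_map]
    congr 1
    have h2 := tails_getD a i hi
    rwa [List.getD_eq_getElem _ _ hlt] at h2
  rw [hmap, rowSpec_getD _ _ _ hj]

theorem headD_drop (a : List Int) (i : Nat) : (a.drop i).headD 0 = a.getD i 0 := by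
  induction a generalizing i with
  | nil => cases i <;> rfl
  | cons x a' ih => cases i with
    | zero => rfl
    | succ i' => simpa using ih i'

theorem walkB_eq (a b : List Int) (fuel i j : Nat)
    (hfuel : fuel = (a.length - i) + (b.length - j)) (hi : i ≤ a.length) (hj : j ≤ b.length) :
    walkB fuel (buildRowsB a b) a b i j = mergeA fuel (a.drop i) (b.drop j) := by
  induction fuel generalizing i j with
  | zero => rfl
  | succ f ih =>
    have hguard : i < a.length ∨ j < b.length := by omega
    simp only [walkB, if_pos hguard]
    rw [lookup_eq a b i j hi hj, ge_eq_not_gt]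
    simp only [mergeA]
    by_cases hgt : pyListGt (b.drop j) (a.drop i) = true
    · -- take from b
      have hjlt : j < b.length := by
        by_contra hc
        have hbd : b.drop j = [] := List.drop_eq_nil_of_le (by omega)
        rw [hbd] at hgt; cases a.drop i <;> simp [pyListGt] at hgt
      rw [hgt]
      simp only [Bool.not_true, Bool.false_eq_true, if_false, if_true]
      rw [headD_drop, List.tail_drop, ih (i := i) (j := j + 1) (by omega) hi (by omega)]
    · -- take from a
      have hilt : i < a.length := by
        by_contra hc
        have had : a.drop i = [] := List.drop_eq_nil_of_le (by omega)
        rcases hb : b.drop j with _ | ⟨y, ys⟩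
        · have := List.drop_eq_nil_iff.mp hb; omega
        · rw [had, hb] at hgt; simp [pyListGt] at hgt
      rw [Bool.eq_false_iff.mpr hgt]
      simp only [Bool.not_false, if_true]
      rw [ih (i := i + 1) (j := j) (by omega) (by omega) hj]
      rw [if_neg (by simp), List.tail_drop, headD_drop]

theorem mergeB_eq (a b : List Int) : mergeB a b = mergeA (a.length + b.length) a b := by
  have h := walkB_eq a b (a.length + b.length) 0 0 (by omega) (by omega) (by omega)
  simp only [List.drop_zero] at h
  exact h

-- Python max over a nonempty list of candidates (first maximal element)
def listMax? : List (List Int) → Option (List Int)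
  | [] => none
  | h :: t => some (t.foldl (fun m c => if pyListGt c m then c else m) h)

theorem listMax?_append (acc : List (List Int)) (c : List Int) :
    listMax? (acc ++ [c]) = some (match listMax? acc with
      | none => c
      | some m => if pyListGt c m then c else m) := by
  cases acc with
  | nil => rfl
  | cons h t => simp [listMax?, List.foldl_append]

theorem fold_max_eq (cond : Int → Prop) [DecidablePred cond] (f : Int → List Int)
    (r : List Int) (acc : List (List Int)) :
    r.foldl (fun (best : Option (List Int)) i =>
        if cond i then
          match best with
          | none => some (f i)
          | some m => if pyListGt (f i) m then some (f i) else some m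
        else best) (listMax? acc)
      = listMax? (r.foldl (fun acc2 i => if cond i then acc2 ++ [f i] else acc2) acc) := by
  induction r generalizing acc with
  | nil => rfl
  | cons x r' ih =>
    simp only [List.foldl_cons]
    by_cases hx : cond x
    · rw [if_pos hx, if_pos hx, ← ih (acc ++ [f x]), listMax?_append]
      cases listMax? acc with
      | none => rfl
      | some m => by_cases hg : pyListGt (f x) m = true <;> simp [hg]
    · rw [if_neg hx, if_neg hx, ih]

theorem match_listMax? (l : List (List Int)) :
    (match l with
      | [] => ([] : List Int)
      | h :: t => t.foldl (fun m c => if pyListGt c m then c else m) h)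
      = (listMax? l).getD [] := by
  cases l <;> rfl

-- ===== VERDICT (by name: the statement is the Claim_ definition above) =====
theorem maxNumber_spec : Claim_equal_maxNumber := by
  intro nums1 nums2 k _hdom _hpre
  unfold Spec_maxNumber maxNumber maxNumber_alt
  simp only [pickB_eq, mergeB_eq]
  rw [match_listMax?]
  rw [show (none : Option (List Int)) = listMax? [] from rfl]
  rw [fold_max_eq (cond := fun i => i ≤ (nums1.length : Int) ∧ k - i ≤ (nums2.length : Int))
      (f := fun i =>
        mergeA ((maxListA nums1 i).length + (maxListA nums2 (k - i)).length)
          (maxListA nums1 i) (maxListA nums2 (k - i)))]
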